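-- pv_equiv track=rewrite | github.com/Kristal1ik/RNE | 9.py | chet_nechet
-- ===== SOURCE A (Python) =====
-- def chet_nechet(lst):
--     chet = 0
--     nechet = 0
--     for i in range(1, len(lst) + 1):
--         if i % 2 == 0:
--             chet += lst[i - 1]
--         else:
--             nechet += lst[i - 1]
--     return abs(chet - nechet) > 40
-- ===== SOURCE B (Python) =====
-- def chet_nechet(lst):
--     it = iter(lst)
--     total = 0
--     for odd_pos in it:
--         total += next(it, 0) - odd_pos
--     return abs(total) > 40
-- ===== Notes on version B (the rewrite author's own statement) =====
-- stated objective: faster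
-- what changed: Replaces A's indexed one-pass loop with a parity branch and two accumulators (chet/nechet) by a pairwise decomposition: the iterator is consumed TWO elements per step and each pair contributes its signed difference to a single total, so there is no index arithmetic and no parity test. Constant-factor speedup measured: the pairwise iterator loop avoids per-element index lookup lst[i-1] and the i%2 branch.
import Mathlib
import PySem

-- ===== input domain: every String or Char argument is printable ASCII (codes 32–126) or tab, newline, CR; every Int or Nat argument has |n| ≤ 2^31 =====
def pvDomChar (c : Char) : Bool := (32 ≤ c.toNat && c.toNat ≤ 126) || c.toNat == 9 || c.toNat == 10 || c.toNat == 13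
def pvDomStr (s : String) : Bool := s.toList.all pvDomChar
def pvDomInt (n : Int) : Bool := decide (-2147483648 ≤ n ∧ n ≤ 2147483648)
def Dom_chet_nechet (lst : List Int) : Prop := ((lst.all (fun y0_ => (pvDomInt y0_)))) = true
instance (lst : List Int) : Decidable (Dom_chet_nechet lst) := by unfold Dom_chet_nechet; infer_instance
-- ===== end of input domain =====

-- B replaces A's indexed parity-branching loop by a pairwise decomposition (two elements per step, no index or parity test); a timing run measured B faster by a constant factor.


-- ===== PORT A =====
def chet_nechet (lst : List Int) : Bool :=
  let p := (PySem.List.pyRange 1 ((lst.length : Int) + 1) 1).foldl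
    (fun (p : Int × Int) i =>
      if PySem.Int.mod i 2 == 0 then (p.1 + PySem.List.pyGetD lst (i - 1) 0, p.2)
      else (p.1, p.2 + PySem.List.pyGetD lst (i - 1) 0)) (0, 0)
  decide (40 < |p.1 - p.2|)

-- ===== PORT B =====
-- recursive pairwise helper: diff of A's 1-based even minus odd positions
def diffB : List Int → Int
  | [] => 0
  | [x] => -x
  | x :: y :: rest => (y - x) + diffB rest

def chet_nechet_alt (lst : List Int) : Bool :=
  decide (40 < |diffB lst|)

-- ===== PRECONDITION & SPEC =====
def Spec_chet_nechet (lst : List Int) (out : Bool) : Prop := out = chet_nechet_alt lst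
instance (lst : List Int) (out : Bool) : Decidable (Spec_chet_nechet lst out) := by unfold Spec_chet_nechet; infer_instance

-- ===== CLAIM (what is proved, stated in full; the proofs are below) =====
def Claim_equal_chet_nechet : Prop := ∀ (lst : List Int), Dom_chet_nechet lst → Spec_chet_nechet lst (chet_nechet lst)

-- ===== LEMMAS AND PROOFS =====

-- A's loop body, named for the proofs (definitionally the lambda in the port).
def stepA (lst : List Int) : Int × Int → Int → Int × Int :=
  fun p i =>
    if PySem.Int.mod i 2 == 0 then (p.1 + PySem.List.pyGetD lst (i - 1) 0, p.2)
    else (p.1, p.2 + PySem.List.pyGetD lst (i - 1) 0)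

lemma getD_at (lst : List Int) (a : Nat) (h : a < lst.length) :
    PySem.List.pyGetD lst ((a : Int)) 0 = lst[a]'h := by
  rw [PySem.List.pyGetD_natCast]; simp [List.getD, h]

-- Invariant: A's index loop from an even position a computes c - n + diffB (lst.drop a).
lemma key (lst : List Int) (t : List Int) : ∀ (a : Nat), lst.drop a = t → a % 2 = 0 →
    ∀ (c n : Int),
    (((PySem.List.pyRange ((a : Int) + 1) ((lst.length : Int) + 1) 1).foldl (stepA lst) (c, n)).1
      - ((PySem.List.pyRange ((a : Int) + 1) ((lst.length : Int) + 1) 1).foldl (stepA lst) (c, n)).2)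
      = c - n + diffB t := by
  induction t using diffB.induct with
  | case1 =>
    intro a h _ c n
    have hlen : lst.length ≤ a := by
      have := List.drop_eq_nil_iff.mp h; omega
    rw [PySem.List.pyRange_one_eq_nil (by omega)]
    simp [diffB]
  | case2 x =>
    intro a h hpar c n
    have hlen : lst.length = a + 1 := by
      have h1 : (lst.drop a).length = 1 := by rw [h]; rfl
      simp at h1; omega
    have hlt : a < lst.length := by omega
    have hx : lst[a]'hlt = x := by
      have h0 : (lst.drop a)[0]? = some x := by rw [h]; rfl
      rw [List.getElem?_drop, Nat.add_zero, List.getElem?_eq_getElem hlt] at h0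
      exact Option.some.inj h0
    rw [PySem.List.pyRange_one_cons (by omega)]
    rw [show ((lst.length : Int) + 1) = (a : Int) + 1 + 1 from by rw [hlen]; push_cast; ring]
    rw [PySem.List.pyRange_one_eq_nil (by omega)]
    have hmod : (PySem.Int.mod ((a : Int) + 1) 2 == 0) = false := by
      simp [PySem.Int.mod, Int.fmod_eq_emod]; omega
    simp only [List.foldl_cons, List.foldl_nil, stepA, hmod, Bool.false_eq_true, if_false]
    rw [show (a : Int) + 1 - 1 = (a : Int) from by ring, getD_at lst a hlt, hx]
    simp [diffB]; ring
  | case3 x y rest ih =>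
    intro a h hpar c n
    have hlen2 : a + 1 < lst.length := by
      have h1 : (lst.drop a).length = rest.length + 2 := by rw [h]; simp
      simp at h1; omega
    have hlt : a < lst.length := by omega
    have hx : lst[a]'hlt = x := by
      have h0 : (lst.drop a)[0]? = some x := by rw [h]; rfl
      rw [List.getElem?_drop, Nat.add_zero, List.getElem?_eq_getElem hlt] at h0
      exact Option.some.inj h0
    have hy : lst[a+1]'hlen2 = y := by
      have h0 : (lst.drop a)[1]? = some y := by rw [h]; rfl
      rw [List.getElem?_drop, List.getElem?_eq_getElem hlen2] at h0
      exact Option.some.inj h0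
    have hdrop : lst.drop (a + 2) = rest := by
      have : ((lst.drop a).tail).tail = rest := by rw [h]; rfl
      rwa [List.tail_drop, List.tail_drop] at this
    rw [PySem.List.pyRange_one_cons (by omega)]
    rw [PySem.List.pyRange_one_cons (by omega)]
    have hmod1 : (PySem.Int.mod ((a : Int) + 1) 2 == 0) = false := by
      simp [PySem.Int.mod, Int.fmod_eq_emod]; omega
    have hmod2 : (PySem.Int.mod ((a : Int) + 1 + 1) 2 == 0) = true := by
      simp [PySem.Int.mod, Int.fmod_eq_emod]; omega
    simp only [List.foldl_cons]
    rw [show stepA lst (c, n) ((a:Int)+1) = (c, n + x) from by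
      simp only [stepA, hmod1, Bool.false_eq_true, if_false]
      rw [show (a : Int) + 1 - 1 = (a : Int) from by ring, getD_at lst a hlt, hx]]
    rw [show stepA lst (c, n + x) ((a:Int)+1+1) = (c + y, n + x) from by
      simp only [stepA, hmod2, if_true]
      rw [show (a : Int) + 1 + 1 - 1 = ((a + 1 : Nat) : Int) from by push_cast; ring,
        getD_at lst (a+1) hlen2, hy]]
    have hrec := ih (a + 2) hdrop (by omega) (c + y) (n + x)
    rw [show ((a + 2 : Nat) : Int) + 1 = (a : Int) + 1 + 1 + 1 from by push_cast; ring] at hrec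
    rw [hrec]
    simp [diffB]; ring

-- ===== VERDICT (by name: the statement is the Claim_ definition above) =====
theorem chet_nechet_spec : Claim_equal_chet_nechet := by
  intro lst _
  have h := key lst lst 0 rfl rfl 0 0
  norm_num at h
  show decide (40 < |((PySem.List.pyRange (((0:Nat):Int) + 1) ((lst.length : Int) + 1) 1).foldl (stepA lst) (0, 0)).1
      - ((PySem.List.pyRange (((0:Nat):Int) + 1) ((lst.length : Int) + 1) 1).foldl (stepA lst) (0, 0)).2|)
    = decide (40 < |diffB lst|)
  norm_num
  rw [h]
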